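-- pv_equiv track=rewrite | github.com/MapleZiyer/programfc | models/program_generator.py | extract_first_program
-- ===== SOURCE A (Python) =====
-- def extract_first_program(data):
--     """提取第一个 'New Question:' 后面紧跟的 'def program():' 块内容。"""
--     lines = data.splitlines()
--     result = []
--     start_extracting = False
--
--     for line in lines:
--         if "New Question:" in line:
--             start_extracting = True
--             result = []
--         if start_extracting:
--             result.append(line)
--             if line.strip() == "" and len(result) > 1:
--                 break
--
--     return "\n".join(line for line in result if line.strip())
-- ===== SOURCE B (Python) =====
-- def extract_first_program(data):
--     """提取第一个 'New Question:' 后面紧跟的 'def program():' 块内容。"""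
--     lines = data.splitlines()
--     i0 = next((i for i, l in enumerate(lines) if "New Question:" in l), None)
--     if i0 is None:
--         return ""
--     tail = lines[i0:]
--     b = next((k for k in range(1, len(tail)) if tail[k].strip() == ""), len(tail))
--     block = tail[:b]
--     j = 0
--     for k, l in enumerate(block):
--         if "New Question:" in l:
--             j = k
--     return "\n".join(block[j:])
-- ===== Notes on version B (the rewrite author's own statement) =====
-- stated objective: alternative
-- what changed: Replaced A's streaming flag/reset state machine (start_extracting, result reset on every 'New Question:', break on blank) by explicit boundary computation: first 'New Question:' line, first blank line after it, last 'New Question:' line before that blank, then one slice joined.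
import Mathlib
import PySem

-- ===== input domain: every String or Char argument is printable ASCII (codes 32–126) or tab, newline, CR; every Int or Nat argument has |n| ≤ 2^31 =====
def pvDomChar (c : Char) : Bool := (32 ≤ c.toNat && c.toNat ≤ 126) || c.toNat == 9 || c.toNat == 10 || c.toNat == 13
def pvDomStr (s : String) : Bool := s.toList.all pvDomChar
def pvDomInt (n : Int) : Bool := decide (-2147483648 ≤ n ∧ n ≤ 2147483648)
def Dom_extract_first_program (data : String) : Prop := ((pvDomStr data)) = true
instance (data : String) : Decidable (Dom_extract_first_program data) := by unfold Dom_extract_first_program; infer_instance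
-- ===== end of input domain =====

-- B replaces A's streaming flag/reset state machine by explicit boundary computation
-- (first 'New Question:' line, first blank after it, last 'New Question:' before that blank)
-- and a slice; objective: alternative decomposition, same cost.

-- shared tiny predicates ("New Question:" in line  /  line.strip() == "")
def pvNQ (l : String) : Bool := PySem.Str.isIn "New Question:" l
def pvBlank (l : String) : Bool := PySem.Str.strip l == ""

-- ===== PORT A =====
-- the for-loop with its (result, start_extracting) state and the break
def pvLoopA : List String → List String → Bool → List String
  | [], result, _ => result
  | line :: rest, result, start =>
    let start' := if pvNQ line then true else start
    let result' := if pvNQ line then [] else result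
    if start' then
      let r2 := result' ++ [line]
      if pvBlank line && decide (1 < r2.length) then r2
      else pvLoopA rest r2 start'
    else pvLoopA rest result' start'

def extract_first_program (data : String) : String :=
  let lines := PySem.Str.splitlines data
  let result := pvLoopA lines [] false
  PySem.Str.join "\n" (result.filter (fun l => !pvBlank l))

-- ===== PORT B =====
def extract_first_program_alt (data : String) : String :=
  let lines := PySem.Str.splitlines data
  match List.findIdx? pvNQ lines with          -- next((i for i,l in enumerate(lines) if NQ in l), None)
  | none => ""
  | some i0 =>
    let tail := lines.drop i0                  -- lines[i0:]
    let b := match List.findIdx? pvBlank (tail.drop 1) with   -- next((k for k in range(1,len(tail)) if blank), len(tail))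
             | some k => 1 + k
             | none => tail.length
    let block := tail.take b                   -- tail[:b]
    let j := (PySem.List.enumerate block 0).foldl            -- for k,l in enumerate(block): if NQ in l: j = k
               (fun j kl => if pvNQ kl.2 then kl.1.toNat else j) 0
    PySem.Str.join "\n" (block.drop j)         -- "\n".join(block[j:])

-- ===== PRECONDITION & SPEC =====
def Spec_extract_first_program (data : String) (out : String) : Prop := out = extract_first_program_alt data
instance (data : String) (out : String) : Decidable (Spec_extract_first_program data out) := by unfold Spec_extract_first_program; infer_instance

-- ===== CLAIM (what is proved, stated in full; the proofs are below) =====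
def Claim_equal_extract_first_program : Prop := ∀ (data : String), Dom_extract_first_program data → Spec_extract_first_program data (extract_first_program data)

-- ===== LEMMAS AND PROOFS =====

-- B's computation from the first 'New Question:' line on, as a named function of the tail
def pvStarted (tail : List String) : String :=
  let b := match List.findIdx? pvBlank (tail.drop 1) with
           | some k => 1 + k
           | none => tail.length
  let block := tail.take b
  let j := (PySem.List.enumerate block 0).foldl
             (fun j kl => if pvNQ kl.2 then kl.1.toNat else j) 0
  PySem.Str.join "\n" (block.drop j)

def pvBcore (lines : List String) : String :=
  match List.findIdx? pvNQ lines with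
  | none => ""
  | some i0 => pvStarted (lines.drop i0)

theorem pvBcore_eq (data : String) :
    extract_first_program_alt data = pvBcore (PySem.Str.splitlines data) := by
  unfold extract_first_program_alt pvBcore pvStarted
  generalize PySem.Str.splitlines data = lines
  cases hidx : List.findIdx? pvNQ lines <;> simp only [hidx]

-- a line containing "New Question:" does not strip to ""
theorem pvStripNil_all (cs : List Char) (h : PySem.Chars.strip cs = []) :
    ∀ c ∈ cs, PySem.Chars.isspace c = true := by
  intro c hc
  simp [PySem.Chars.strip, PySem.Chars.rstrip, PySem.Chars.lstrip] at h
  rw [← List.takeWhile_append_dropWhile (p := PySem.Chars.isspace) (l := cs)] at hc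
  rcases List.mem_append.1 hc with h1 | h2
  · exact List.mem_takeWhile_imp h1
  · exact h c h2

theorem pvNQ_nonblank (l : String) (h : pvNQ l = true) : pvBlank l = false := by
  unfold pvNQ pvBlank at *
  rw [PySem.Str.isIn_iff_infix] at h
  by_contra hb
  simp at hb
  have h0 : (PySem.Str.strip l).toList = [] := by rw [hb]; rfl
  rw [PySem.Str.toList_strip] at h0
  have hall := pvStripNil_all _ h0
  have hN : 'N' ∈ l.toList := by
    obtain ⟨p, s, hps⟩ := h
    rw [← hps]
    simp [List.mem_append]
  have := hall 'N' hN
  simp [PySem.Chars.isspace] at this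

-- the j-fold ignores non-NQ lines
theorem pvFold_id (z : List String) (s : Int) (v : Nat)
    (hz : ∀ l ∈ z, pvNQ l = false) :
    (PySem.List.enumerate z s).foldl (fun j kl => if pvNQ kl.2 then kl.1.toNat else j) v = v := by
  induction z generalizing s v with
  | nil => simp [PySem.List.enumerate_nil]
  | cons l t ih =>
    rw [PySem.List.enumerate_cons]
    simp only [List.foldl_cons, hz l (by simp)]
    exact ih _ _ (fun x hx => hz x (by simp [hx]))

-- shifting the enumeration start shifts the j-fold result
theorem pvFold_shift (z : List String) (s₁ s₂ v : Nat) :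
    (PySem.List.enumerate z ((s₁ : Int) + (s₂ : Int))).foldl
        (fun j kl => if pvNQ kl.2 then kl.1.toNat else j) (s₁ + v)
      = s₁ + (PySem.List.enumerate z (s₂ : Int)).foldl
        (fun j kl => if pvNQ kl.2 then kl.1.toNat else j) v := by
  induction z generalizing s₂ v with
  | nil => simp [PySem.List.enumerate_nil]
  | cons l t ih =>
    rw [PySem.List.enumerate_cons, PySem.List.enumerate_cons]
    simp only [List.foldl_cons]
    have hcast : (s₁ : Int) + (s₂ : Int) + 1 = (s₁ : Int) + ((s₂ + 1 : Nat) : Int) := by push_cast; ring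
    rw [hcast]
    by_cases hl : pvNQ l
    · simp only [hl, if_true]
      have h2 : ((s₁ : Int) + (s₂ : Int)).toNat = s₁ + ((s₂ : Int)).toNat := by omega
      rw [h2]; exact ih _ _
    · simp only [hl, if_false, Bool.false_eq_true]
      exact ih _ _

theorem pvEnum_append (xs ys : List String) (s : Int) :
    PySem.List.enumerate (xs ++ ys) s
      = PySem.List.enumerate xs s ++ PySem.List.enumerate ys (s + xs.length) := by
  induction xs generalizing s with
  | nil => simp [PySem.List.enumerate_nil]
  | cons x t ih =>
    simp [PySem.List.enumerate_cons, ih]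
    ring_nf

-- the j-fold over an (h :: mid) block with NQ only at the head is 0
theorem pvJ_acc (h : String) (mid : List String) (hh : pvNQ h = true)
    (hmid : ∀ l ∈ mid, pvNQ l = false) :
    (PySem.List.enumerate (h :: mid) 0).foldl
        (fun j kl => if pvNQ kl.2 then kl.1.toNat else j) 0 = 0 := by
  rw [PySem.List.enumerate_cons]
  simp only [List.foldl_cons, hh, if_true, Int.toNat_zero]
  exact pvFold_id mid 1 0 hmid

-- dropping up to the last NQ line ignores a collected prefix before a fresh NQ line
theorem pvJ_head (y : String) (bs' : List String) (s : Nat) (v : Nat) (hy : pvNQ y = true) :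
    (PySem.List.enumerate (y :: bs') (s : Int)).foldl
        (fun j kl => if pvNQ kl.2 then kl.1.toNat else j) v
      = s + (PySem.List.enumerate (y :: bs') 0).foldl
        (fun j kl => if pvNQ kl.2 then kl.1.toNat else j) 0 := by
  rw [PySem.List.enumerate_cons, PySem.List.enumerate_cons]
  simp only [List.foldl_cons, hy, if_true, Int.toNat_zero, Int.toNat_natCast]
  have h1 : (s : Int) + 1 = (s : Int) + ((1 : Nat) : Int) := by norm_num
  have h2 : (0 : Int) + 1 = ((1 : Nat) : Int) := by norm_num
  rw [h1, h2]
  have h3 := pvFold_shift bs' s 1 0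
  rw [Nat.add_zero] at h3
  exact h3

theorem pvJdrop (h y : String) (mid bs' : List String)
    (hh : pvNQ h = true) (hy : pvNQ y = true)
    (hmid : ∀ l ∈ mid, pvNQ l = false) :
    ((h :: mid) ++ y :: bs').drop
        ((PySem.List.enumerate ((h :: mid) ++ y :: bs') 0).foldl
          (fun j kl => if pvNQ kl.2 then kl.1.toNat else j) 0)
      = (y :: bs').drop
        ((PySem.List.enumerate (y :: bs') 0).foldl
          (fun j kl => if pvNQ kl.2 then kl.1.toNat else j) 0) := by
  rw [pvEnum_append, List.foldl_append, pvJ_acc h mid hh hmid]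
  have hlen : (0 : Int) + ((h :: mid).length : Int) = ((mid.length + 1 : Nat) : Int) := by
    push_cast; simp
  rw [hlen, pvJ_head y bs' (mid.length + 1) 0 hy]
  rw [List.drop_append]
  have hdropall : (h :: mid).drop (mid.length + 1 +
      (PySem.List.enumerate (y :: bs') 0).foldl
        (fun j kl => if pvNQ kl.2 then kl.1.toNat else j) 0) = [] :=
    List.drop_eq_nil_of_le (by simp)
  have harith : mid.length + 1 +
      (PySem.List.enumerate (y :: bs') 0).foldl
        (fun j kl => if pvNQ kl.2 then kl.1.toNat else j) 0 - (h :: mid).length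
      = (PySem.List.enumerate (y :: bs') 0).foldl
        (fun j kl => if pvNQ kl.2 then kl.1.toNat else j) 0 := by simp
  rw [hdropall, harith]
  simp

-- pvStarted is invariant under prepending an already-collected non-blank, non-resetting prefix
theorem pvStarted_shift (mid : List String) (h y : String) (t' : List String)
    (hh : pvNQ h = true) (hy : pvNQ y = true)
    (hmid : ∀ l ∈ mid, pvNQ l = false ∧ pvBlank l = false) :
    pvStarted ((h :: mid) ++ y :: t') = pvStarted (y :: t') := by
  have hyb : pvBlank y = false := pvNQ_nonblank y hy
  have hmidn : List.findIdx? pvBlank mid = none :=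
    List.findIdx?_eq_none_iff.2 (fun l hl => (hmid l hl).2)
  unfold pvStarted
  simp only [List.cons_append, List.drop_succ_cons, List.drop_zero]
  rw [List.findIdx?_append, hmidn, List.findIdx?_cons]
  simp only [hyb, Bool.false_eq_true, if_false, Option.none_or, Option.map_map]
  cases hF : List.findIdx? pvBlank t' with
  | none =>
    simp only [Option.map_none]
    have key := congrArg (PySem.Str.join "\n")
      (pvJdrop h y mid t' hh hy (fun l hl => (hmid l hl).1))
    simpa only [List.take_length, List.cons_append] using key
  | some k =>
    simp only [Option.map_some, Function.comp_apply]
    have htake : (h :: (mid ++ y :: t')).take (1 + (k + 1 + mid.length))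
        = h :: (mid ++ y :: t'.take k) := by
      have e1 : 1 + (k + 1 + mid.length) = (mid.length + (k + 1)) + 1 := by omega
      rw [e1, List.take_succ_cons, List.take_append]
      have e2 : mid.length + (k + 1) - mid.length = k + 1 := by omega
      rw [e2, List.take_of_length_le (by omega), List.take_succ_cons]
    have htake2 : (y :: t').take (1 + k) = y :: t'.take k := by
      have e3 : 1 + k = k + 1 := by omega
      rw [e3, List.take_succ_cons]
    rw [htake, htake2]
    have key := congrArg (PySem.Str.join "\n")
      (pvJdrop h y mid (t'.take k) hh hy (fun l hl => (hmid l hl).1))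
    simpa only [List.cons_append] using key

-- the inner loop (started state) equals B's boundary computation
theorem pvInner (t : List String) (hd : String) (mid : List String)
    (hh : pvNQ hd = true)
    (hmid : ∀ l ∈ mid, pvNQ l = false ∧ pvBlank l = false) :
    PySem.Str.join "\n" ((pvLoopA t (hd :: mid) true).filter (fun l => !pvBlank l))
      = pvStarted ((hd :: mid) ++ t) := by
  induction t generalizing hd mid with
  | nil =>
    simp only [pvLoopA]
    have hfil : (hd :: mid).filter (fun l => !pvBlank l) = hd :: mid := by
      rw [List.filter_eq_self]
      intro a ha
      rcases List.mem_cons.1 ha with rfl | hm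
      · simp [pvNQ_nonblank a hh]
      · simp [(hmid a hm).2]
    rw [hfil, List.append_nil]
    unfold pvStarted
    have hd1 : (hd :: mid).drop 1 = mid := rfl
    rw [hd1, List.findIdx?_eq_none_iff.2 (fun l hl => (hmid l hl).2)]
    simp only [List.take_length]
    rw [pvJ_acc hd mid hh (fun l hl => (hmid l hl).1)]
    simp
  | cons y t' ih =>
    by_cases hy : pvNQ y
    · have hyb := pvNQ_nonblank y hy
      have hstep : pvLoopA (y :: t') (hd :: mid) true = pvLoopA t' [y] true := by
        simp [pvLoopA, hy, hyb]
      rw [hstep, ih y [] hy (by simp)]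
      simp only [List.singleton_append]
      exact (pvStarted_shift mid hd y t' hh hy hmid).symm
    · have hmidn : List.findIdx? pvBlank mid = none :=
        List.findIdx?_eq_none_iff.2 (fun l hl => (hmid l hl).2)
      by_cases hybl : pvBlank y
      · have hstep : pvLoopA (y :: t') (hd :: mid) true = (hd :: mid) ++ [y] := by
          simp [pvLoopA, hy, hybl]
        rw [hstep]
        have hfil : ((hd :: mid) ++ [y]).filter (fun l => !pvBlank l) = hd :: mid := by
          rw [List.filter_append]
          have h1 : (hd :: mid).filter (fun l => !pvBlank l) = hd :: mid := by
            rw [List.filter_eq_self]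
            intro a ha
            rcases List.mem_cons.1 ha with rfl | hm
            · simp [pvNQ_nonblank a hh]
            · simp [(hmid a hm).2]
          have h2 : [y].filter (fun l => !pvBlank l) = [] := by simp [hybl]
          rw [h1, h2, List.append_nil]
        rw [hfil]
        unfold pvStarted
        simp only [List.cons_append, List.drop_succ_cons, List.drop_zero]
        rw [List.findIdx?_append, hmidn, List.findIdx?_cons]
        simp only [hybl, if_true, Option.none_or, Option.map_some]
        have hb : 1 + (0 + mid.length) = mid.length + 1 := by omega
        rw [hb]
        have htake : (hd :: (mid ++ y :: t')).take (mid.length + 1) = hd :: mid := by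
          rw [List.take_succ_cons, List.take_append]
          simp
        rw [htake, pvJ_acc hd mid hh (fun l hl => (hmid l hl).1)]
        simp
      · have hstep : pvLoopA (y :: t') (hd :: mid) true
            = pvLoopA t' ((hd :: mid) ++ [y]) true := by
          simp [pvLoopA, hy, hybl]
        rw [hstep]
        have hx : (hd :: mid) ++ [y] = hd :: (mid ++ [y]) := by simp
        rw [hx]
        have hmid' : ∀ l ∈ mid ++ [y], pvNQ l = false ∧ pvBlank l = false := by
          intro l hl
          rcases List.mem_append.1 hl with hm | hm
          · exact hmid l hm
          · rcases List.mem_singleton.1 hm with rfl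
            exact ⟨eq_false_of_ne_true hy, eq_false_of_ne_true hybl⟩
        rw [ih hd (mid ++ [y]) hh hmid']
        congr 1
        simp

theorem pvMain (lines : List String) :
    PySem.Str.join "\n" ((pvLoopA lines [] false).filter (fun l => !pvBlank l))
      = pvBcore lines := by
  induction lines with
  | nil => simp [pvLoopA, pvBcore]; rfl
  | cons l t ih =>
    by_cases hl : pvNQ l
    · have hlb := pvNQ_nonblank l hl
      have hstep : pvLoopA (l :: t) [] false = pvLoopA t [l] true := by
        simp [pvLoopA, hl, hlb]
      rw [hstep, pvInner t l [] hl (by simp)]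
      unfold pvBcore
      rw [List.findIdx?_cons]
      simp only [hl, if_true]
      simp
    · have hstep : pvLoopA (l :: t) [] false = pvLoopA t [] false := by
        simp [pvLoopA, hl]
      rw [hstep, ih]
      unfold pvBcore
      rw [List.findIdx?_cons]
      simp only [hl, Bool.false_eq_true, if_false]
      cases hF : List.findIdx? pvNQ t with
      | none => simp
      | some i0 => simp [List.drop_succ_cons]

-- ===== VERDICT (by name: the statement is the Claim_ definition above) =====
theorem extract_first_program_spec : Claim_equal_extract_first_program := by
  intro data _
  unfold Spec_extract_first_program
  rw [pvBcore_eq]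
  show PySem.Str.join "\n" ((pvLoopA (PySem.Str.splitlines data) [] false).filter (fun l => !pvBlank l)) = _
  exact pvMain (PySem.Str.splitlines data)
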